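-- pv_equiv track=rewrite | github.com/Masato4556/competition-python | utils/string/sa_is.py | classify_chartype
-- ===== SOURCE A (Python) =====
-- def classify_chartype(T):
--     """ Classify charactor to L/S type: S = 1, L = 0
--
--         Returns
--         -------
--         :list types: list of 0 and 1
--         :list lms_ids: list of Left Most S-type
--     """
--     num_char = len(T)
--     types = [1] * num_char  # S = 1, L = 0
--     lms_ids = []
--     for i in range(num_char - 2, -1, -1):
--         if T[i] > T[i + 1]:  # T[i] is L-type
--             types[i] = 0
--             if types[i] == 0 and types[i + 1] == 1:
--                 # position of Left Most S-charactor (LMS)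
--                 lms_ids.append(i + 1)
--         elif T[i] == T[i + 1]:
--             types[i] = types[i + 1]
--     lms_ids.reverse()
--     return types, lms_ids
-- ===== SOURCE B (Python) =====
-- def classify_chartype(T):
--     """Run-based forward algorithm: split T into maximal runs of equal
--     characters, type each whole run by comparing its value with the next
--     run's value (last run is S), then expand run types and take the start
--     of every S-run that follows an L-run as an LMS position."""
--     n = len(T)
--     runs = []  # (value, length) of each maximal run, left to right
--     i = 0
--     while i < n:
--         j = i + 1
--         while j < n and T[j] == T[i]:
--             j += 1
--         runs.append((T[i], j - i))
--         i = j
--     # a run is L (0) iff its value is greater than the next run's value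
--     run_types = [0 if v > w else 1 for (v, _), (w, _) in zip(runs, runs[1:])]
--     run_types += [1] if runs else []
--     types, lms_ids, pos, prev = [], [], 0, None
--     for (v, ln), rt in zip(runs, run_types):
--         if prev == 0 and rt == 1:
--             lms_ids.append(pos)
--         types += [rt] * ln
--         pos += ln
--         prev = rt
--     return types, lms_ids
-- ===== Notes on version B (the rewrite author's own statement) =====
-- stated objective: alternative
-- what changed: A's single backward per-character pass (mutating a preallocated types array, inheriting types on ties, and reversing the LMS list at the end) is replaced by a forward run-length algorithm: split T into maximal runs of equal characters, type each whole run at once by comparing adjacent run values (no tie-inheritance, ties cannot occur between runs), then expand the run types and emit the start of every S-run that follows an L-run as an LMS position, in ascending order with no reverse.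
import Mathlib
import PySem

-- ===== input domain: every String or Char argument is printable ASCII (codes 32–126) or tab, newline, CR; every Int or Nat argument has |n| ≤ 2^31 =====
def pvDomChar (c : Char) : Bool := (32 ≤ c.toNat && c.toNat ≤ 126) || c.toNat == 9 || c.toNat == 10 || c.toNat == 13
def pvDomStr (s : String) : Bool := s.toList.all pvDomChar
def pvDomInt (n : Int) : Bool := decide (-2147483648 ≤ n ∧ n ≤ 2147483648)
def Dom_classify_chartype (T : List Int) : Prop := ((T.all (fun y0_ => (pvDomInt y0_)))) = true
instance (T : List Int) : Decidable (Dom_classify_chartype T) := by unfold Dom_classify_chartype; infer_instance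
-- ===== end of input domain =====

-- B replaces A's backward per-character pass (in-place array mutation, tie inheritance,
-- final reverse of the LMS list) by a forward run-length algorithm: split T into maximal
-- runs of equal characters, type each whole run by comparing adjacent run values, expand,
-- and emit the start of every S-run following an L-run; objective: alternative.

-- ===== PORT A =====
-- one iteration of A's 'for i in range(num_char-2,-1,-1)' body at index i
-- (T[i], T[i+1], types[i+1] reads are always in range there, so getD defaults are never used)
def stepA (T : List Int) (i : Nat) (st : List Int × List Int) : List Int × List Int :=
  let types := st.1
  let lms := st.2
  if PySem.List.pyGetD T (i : Int) 0 > PySem.List.pyGetD T ((i : Int) + 1) 0 then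
    let types' := types.set i 0
    if types'.getD i 1 == 0 && types'.getD (i + 1) 1 == 1 then
      (types', lms ++ [((i : Int) + 1)])
    else (types', lms)
  else if PySem.List.pyGetD T (i : Int) 0 == PySem.List.pyGetD T ((i : Int) + 1) 0 then
    (types.set i (types.getD (i + 1) 1), lms)
  else (types, lms)

-- the loop: processes indices k-1, k-2, …, 0 (A runs it with k = num_char - 1)
def loopA (T : List Int) : Nat → (List Int × List Int) → List Int × List Int
  | 0, st => st
  | (i + 1), st => loopA T i (stepA T i st)

def classify_chartype (T : List Int) : List Int × List Int :=
  let num_char := T.length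
  let st := loopA T (num_char - 1) (List.replicate num_char 1, [])
  (st.1, st.2.reverse)

-- ===== PORT B =====
-- the outer while loop of Source B: one step cuts off the maximal run of T[i] at the front
-- (the inner 'while j < n and T[j] == T[i]' is exactly takeWhile/dropWhile on the rest)
def runsOf : List Int → List (Int × Int)
  | [] => []
  | x :: r =>
    (x, (((x :: r).takeWhile (fun c => c == x)).length : Int))
      :: runsOf ((x :: r).dropWhile (fun c => c == x))
  termination_by l => l.length
  decreasing_by
    simp only [List.dropWhile_cons, beq_self_eq_true, if_true]
    exact Nat.lt_succ_of_le (List.length_dropWhile_le _ _)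

-- one iteration of Source B's 'for (v, ln), rt in zip(runs, run_types)' body;
-- state = (types, lms_ids, pos, prev); '[rt] * ln' with ln ≥ 1 is replicate ln.toNat rt
def stepBAlt (st : List Int × List Int × Int × Option Int) (p : (Int × Int) × Int) :
    List Int × List Int × Int × Option Int :=
  (st.1 ++ List.replicate p.1.2.toNat p.2,
   (if st.2.2.2 == some 0 && p.2 == 1 then st.2.1 ++ [st.2.2.1] else st.2.1),
   st.2.2.1 + p.1.2, some p.2)

def classify_chartype_alt (T : List Int) : List Int × List Int :=
  let rs := runsOf T
  let run_types := (rs.zip rs.tail).map (fun pq => if pq.1.1 > pq.2.1 then (0 : Int) else 1)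
      ++ (if rs.isEmpty then [] else [1])
  let s := (rs.zip run_types).foldl stepBAlt ([], [], 0, none)
  (s.1, s.2.1)

-- ===== PRECONDITION & SPEC =====
def Spec_classify_chartype (T : List Int) (out : List Int × List Int) : Prop := out = classify_chartype_alt T
instance (T : List Int) (out : List Int × List Int) : Decidable (Spec_classify_chartype T out) := by unfold Spec_classify_chartype; infer_instance

-- ===== CLAIM (what is proved, stated in full; the proofs are below) =====
def Claim_equal_classify_chartype : Prop := ∀ (T : List Int), Dom_classify_chartype T → Spec_classify_chartype T (classify_chartype T)

-- ===== LEMMAS AND PROOFS =====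

-- the type list both programs compute, as a structural recursion (proof-side spec)
def typesOf : List Int → List Int
  | [] => []
  | [_] => [1]
  | x :: y :: r =>
    (if x > y then 0 else if x < y then 1 else (typesOf (y :: r)).headD 1) :: typesOf (y :: r)

theorem length_typesOf (T : List Int) : (typesOf T).length = T.length := by
  induction T with
  | nil => rfl
  | cons x t ih =>
    cases t with
    | nil => rfl
    | cons y r => simp [typesOf] at ih ⊢; omega

theorem typesOf_getD_last (T : List Int) (h : T ≠ []) :
    (typesOf T).getD (T.length - 1) 1 = 1 := by
  induction T with
  | nil => simp at h
  | cons x t ih =>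
    cases t with
    | nil => rfl
    | cons y r =>
      have := ih (by simp)
      simpa [typesOf, List.getD] using this

theorem typesOf_getD_step (T : List Int) (k : Nat) (h : k + 1 < T.length) :
    (typesOf T).getD k 1 =
      (if T.getD k 0 > T.getD (k + 1) 0 then 0
       else if T.getD k 0 < T.getD (k + 1) 0 then 1
       else (typesOf T).getD (k + 1) 1) := by
  induction T generalizing k with
  | nil => simp at h
  | cons x t ih =>
    cases t with
    | nil => simp at h
    | cons y r =>
      cases k with
      | zero =>
        simp only [typesOf, List.getD, List.getElem?_cons_zero, List.getElem?_cons_succ,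
          Option.getD_some]
        have hh : (typesOf (y :: r)).getD 0 1 = (typesOf (y :: r)).headD 1 := by
          cases r <;> simp [typesOf, List.getD]
        simp [List.getD] at hh
        cases r <;> simp_all [typesOf]
      | succ k =>
        have := ih k (by simpa using Nat.lt_of_succ_lt_succ h)
        simpa [List.getD] using this

theorem getD_drop_zero (l : List Int) (k : Nat) (d : Int) :
    (l.drop k).getD 0 d = l.getD k d := by
  simp [List.getD_eq_getElem?_getD, List.getElem?_drop]

theorem drop_eq_getD_cons (l : List Int) (k : Nat) (d : Int) (h : k < l.length) :
    l.drop k = l.getD k d :: l.drop (k + 1) := by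
  rw [List.drop_eq_getElem_cons h, List.getD_eq_getElem l d h]

theorem set_replicate_append (k : Nat) (a v : Int) (l : List Int) :
    (List.replicate (k + 1) a ++ l).set k v = List.replicate k a ++ v :: l := by
  induction k with
  | zero => rfl
  | succ k ih => simpa [List.replicate_succ] using ih

-- A's types array after processing indices down to k, and the LMS positions above k
def mixA (T : List Int) (k : Nat) : List Int := List.replicate k 1 ++ (typesOf T).drop k
def condI (T : List Int) (i : Int) : Bool :=
  PySem.List.pyGetD (typesOf T) i 1 == 1 && PySem.List.pyGetD (typesOf T) (i - 1) 1 == 0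
def ascB (T : List Int) (k : Nat) : List Int :=
  (PySem.List.pyRange ((k : Int) + 1) (T.length : Int) 1).filter (condI T)

theorem condI_succ (T : List Int) (k : Nat) :
    condI T ((k : Int) + 1)
      = (((typesOf T).getD (k + 1) 1 == 1) && ((typesOf T).getD k 1 == 0)) := by
  unfold condI
  have h2 : ((k : Int) + 1) - 1 = ((k : Nat) : Int) := by ring
  have h1 : ((k : Int) + 1) = ((k + 1 : Nat) : Int) := by push_cast; ring
  rw [h2, PySem.List.pyGetD_natCast, h1, PySem.List.pyGetD_natCast]

theorem stepA_inv (T : List Int) (k : Nat) (h : k + 1 ≤ T.length - 1) :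
    stepA T k (mixA T (k + 1), (ascB T (k + 1)).reverse) = (mixA T k, (ascB T k).reverse) := by
  have hn : k + 1 < T.length := by omega
  have hk : k < T.length := by omega
  have hts : k + 1 < (typesOf T).length := by rw [length_typesOf]; omega
  have hgk : PySem.List.pyGetD T ((k : Int)) 0 = T.getD k 0 := PySem.List.pyGetD_natCast T k 0
  have hgk1 : PySem.List.pyGetD T ((k : Int) + 1) 0 = T.getD (k + 1) 0 := by
    have := PySem.List.pyGetD_natCast T (k + 1) 0
    push_cast at this; exact this
  have hstep := typesOf_getD_step T k hn
  have hdropk := drop_eq_getD_cons (typesOf T) k 1 (by omega)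
  have hmix1 : (mixA T (k + 1)).getD (k + 1) 1 = (typesOf T).getD (k + 1) 1 := by
    unfold mixA
    rw [List.getD_append_right _ _ _ _ (by simp)]
    simp
  have hlt : ((k : Int) + 1) < (T.length : Int) := by exact_mod_cast hn
  have hrange : PySem.List.pyRange ((k : Int) + 1) (T.length : Int) 1
      = ((k : Int) + 1) :: PySem.List.pyRange (((k + 1 : Nat) : Int) + 1) (T.length : Int) 1 := by
    rw [PySem.List.pyRange_one_cons hlt]
    congr 2
  unfold stepA
  rw [hgk, hgk1]
  by_cases hxy : T.getD k 0 > T.getD (k + 1) 0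
  · rw [if_pos hxy] at hstep ⊢
    have htk : (typesOf T).getD k 1 = 0 := hstep
    have hset : (mixA T (k + 1)).set k 0 = mixA T k := by
      unfold mixA
      rw [set_replicate_append]
      rw [hdropk, htk]
    have hset' : (mixA T (k + 1)).set k 0 = List.replicate k 1 ++ (0 : Int) :: (typesOf T).drop (k + 1) := by
      unfold mixA; rw [set_replicate_append]
    simp only [hset']
    have hg0 : (List.replicate k (1:Int) ++ (0 : Int) :: (typesOf T).drop (k + 1)).getD k 1 = 0 := by
      rw [List.getD_append_right _ _ _ _ (by simp)]
      simp
    have hg1 : (List.replicate k (1:Int) ++ (0 : Int) :: (typesOf T).drop (k + 1)).getD (k + 1) 1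
        = (typesOf T).getD (k + 1) 1 := by
      rw [List.getD_append_right _ _ _ _ (by simp)]
      have h2 : k + 1 - (List.replicate k (1:Int)).length = 1 := by simp
      rw [h2, List.getD_cons_succ, getD_drop_zero]
    by_cases h1 : (typesOf T).getD (k + 1) 1 = 1
    · have hcond : condI T ((k : Int) + 1) = true := by
        rw [condI_succ, h1, htk]; rfl
      have hb : ((List.replicate k (1:Int) ++ (0 : Int) :: (typesOf T).drop (k + 1)).getD k 1 == 0 &&
          (List.replicate k (1:Int) ++ (0 : Int) :: (typesOf T).drop (k + 1)).getD (k + 1) 1 == 1) = true := by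
        rw [hg0, hg1, h1]; rfl
      rw [if_pos hb, Prod.mk.injEq]
      constructor
      · rw [← hset, hset']
      · show (ascB T (k + 1)).reverse ++ [(k : Int) + 1] = (ascB T k).reverse
        have hc : ascB T k = ((k : Int) + 1) :: ascB T (k + 1) := by
          unfold ascB
          rw [hrange, List.filter_cons_of_pos hcond]
        rw [hc, List.reverse_cons]
    · have hcond : condI T ((k : Int) + 1) = false := by
        rw [condI_succ, beq_eq_false_iff_ne.mpr h1, Bool.false_and]
      have hb : ((List.replicate k (1:Int) ++ (0 : Int) :: (typesOf T).drop (k + 1)).getD k 1 == 0 &&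
          (List.replicate k (1:Int) ++ (0 : Int) :: (typesOf T).drop (k + 1)).getD (k + 1) 1 == 1) = false := by
        rw [hg0, hg1, beq_eq_false_iff_ne.mpr h1]
        rfl
      rw [if_neg (fun hc => by rw [hb] at hc; exact Bool.false_ne_true hc), Prod.mk.injEq]
      constructor
      · rw [← hset, hset']
      · show (ascB T (k + 1)).reverse = (ascB T k).reverse
        have hc : ascB T k = ascB T (k + 1) := by
          unfold ascB
          rw [hrange, List.filter_cons_of_neg (by simp [hcond])]
        rw [hc]
  · rw [if_neg hxy] at hstep ⊢
    have hcondF : condI T ((k : Int) + 1) = false := by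
      rw [condI_succ]
      by_cases h1 : (typesOf T).getD (k + 1) 1 = 1
      · rw [h1] at hstep
        have hne0 : (typesOf T).getD k 1 ≠ 0 := by
          rw [hstep]; split_ifs <;> decide
        rw [beq_eq_false_iff_ne.mpr hne0, Bool.and_false]
      · rw [beq_eq_false_iff_ne.mpr h1, Bool.false_and]
    have hasc : ascB T k = ascB T (k + 1) := by
      unfold ascB
      rw [hrange, List.filter_cons_of_neg (by simp [hcondF])]
    by_cases heq : T.getD k 0 = T.getD (k + 1) 0
    · rw [if_pos (beq_iff_eq.mpr heq)]
      have hlt2 : ¬ T.getD k 0 < T.getD (k + 1) 0 := by omega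
      rw [if_neg hlt2] at hstep
      have hset : (mixA T (k + 1)).set k ((mixA T (k + 1)).getD (k + 1) 1) = mixA T k := by
        conv_lhs => rw [hmix1]
        unfold mixA
        rw [set_replicate_append, ← hstep, ← hdropk]
      rw [hset, hasc]
    · rw [if_neg (fun hc => heq (beq_iff_eq.mp hc))]
      have hlt2 : T.getD k 0 < T.getD (k + 1) 0 := by omega
      rw [if_pos hlt2] at hstep
      have hmix : mixA T (k + 1) = mixA T k := by
        unfold mixA
        rw [hdropk, hstep]
        rw [List.replicate_succ' (n := k)]
        simp
      rw [hmix, hasc]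

theorem loopA_run (T : List Int) : ∀ k, k ≤ T.length - 1 →
    loopA T k (mixA T k, (ascB T k).reverse) = (typesOf T, (ascB T 0).reverse) := by
  intro k
  induction k with
  | zero => intro _; simp [loopA, mixA]
  | succ k ih =>
    intro h
    show loopA T k (stepA T k (mixA T (k + 1), (ascB T (k + 1)).reverse)) = _
    rw [stepA_inv T k h]
    exact ih (by omega)

-- A's result in closed form
theorem A_eq (T : List Int) (hne : T ≠ []) : classify_chartype T = (typesOf T, ascB T 0) := by
  have hn : 1 ≤ T.length := by
    cases T with
    | nil => exact absurd rfl hne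
    | cons x t => simp
  have hl : (typesOf T).length = T.length := length_typesOf T
  have hstart_types : List.replicate T.length (1 : Int) = mixA T (T.length - 1) := by
    unfold mixA
    have hlast : (typesOf T).drop (T.length - 1) = [1] := by
      rw [drop_eq_getD_cons (typesOf T) (T.length - 1) 1 (by omega)]
      rw [typesOf_getD_last T hne]
      have h2 : T.length - 1 + 1 = (typesOf T).length := by omega
      rw [h2, List.drop_length]
    rw [hlast]
    have h3 : T.length = (T.length - 1) + 1 := by omega
    conv_lhs => rw [h3]
    rw [List.replicate_succ']
  have hstart_lms : (ascB T (T.length - 1)).reverse = ([] : List Int) := by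
    unfold ascB
    rw [PySem.List.pyRange_one_eq_nil (by omega)]
    rfl
  have hA : classify_chartype T
      = ((loopA T (T.length - 1) (List.replicate T.length 1, [])).1,
         (loopA T (T.length - 1) (List.replicate T.length 1, [])).2.reverse) := rfl
  rw [hA, hstart_types, ← hstart_lms, loopA_run T (T.length - 1) (le_refl _),
      List.reverse_reverse]

-- the LMS positions of a type list, read forward with the previous type at hand
def lmsP : Int → List Int → Int → List Int
  | _, [], _ => []
  | prev, t :: r, i => (if prev == 0 && t == 1 then [i] else []) ++ lmsP t r (i + 1)

-- A's range-filter of LMS indices is the forward reading lmsP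
theorem filter_eq_lmsP (T : List Int) : ∀ m k, k < T.length → T.length - k ≤ m + 1 →
    (PySem.List.pyRange ((k : Int) + 1) (T.length : Int) 1).filter (condI T)
      = lmsP ((typesOf T).getD k 1) ((typesOf T).drop (k + 1)) ((k : Int) + 1) := by
  intro m
  induction m with
  | zero =>
    intro k hk hm
    have h1 : k + 1 = T.length := by omega
    rw [PySem.List.pyRange_one_eq_nil (by exact_mod_cast le_of_eq h1.symm)]
    have : (typesOf T).drop (k + 1) = [] :=
      List.drop_eq_nil_of_le (by rw [length_typesOf]; omega)
    rw [this]; rfl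
  | succ m ih =>
    intro k hk hm
    by_cases hend : k + 1 = T.length
    · rw [PySem.List.pyRange_one_eq_nil (by exact_mod_cast le_of_eq hend.symm)]
      have : (typesOf T).drop (k + 1) = [] :=
        List.drop_eq_nil_of_le (by rw [length_typesOf]; omega)
      rw [this]; rfl
    · have hk1 : k + 1 < T.length := by omega
      have hts : k + 1 < (typesOf T).length := by rw [length_typesOf]; omega
      rw [PySem.List.pyRange_one_cons (by exact_mod_cast hk1), List.filter_cons]
      rw [drop_eq_getD_cons (typesOf T) (k + 1) 1 hts]
      show _ = lmsP _ (_ :: _) _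
      rw [lmsP]
      have hrec : PySem.List.pyRange ((k : Int) + 1 + 1) (T.length : Int) 1
          = PySem.List.pyRange (((k + 1 : Nat) : Int) + 1) (T.length : Int) 1 := by
        congr 1
      rw [hrec, ih (k + 1) hk1 (by omega), condI_succ]
      have hcast : ((k : Int) + 1) + 1 = (((k + 1 : Nat) : Int) + 1) := by push_cast; ring
      rw [hcast, Bool.and_comm]
      by_cases hc : (((typesOf T).getD k 1 == 0) && ((typesOf T).getD (k + 1) 1 == 1)) = true
      · rw [if_pos hc, if_pos hc]; rfl
      · rw [if_neg hc, if_neg hc]; rfl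

-- run types: a run is L (0) iff its value exceeds the next run's value; the last run is S
def rtOf : List (Int × Int) → List Int
  | [] => []
  | [_] => [1]
  | p :: q :: rest => (if p.1 > q.1 then 0 else 1) :: rtOf (q :: rest)

-- Source B's zip-comprehension computes rtOf
theorem zipmap_eq_rtOf : ∀ rs : List (Int × Int),
    (rs.zip rs.tail).map (fun pq => if pq.1.1 > pq.2.1 then (0 : Int) else 1)
      ++ (if rs.isEmpty then [] else [1]) = rtOf rs := by
  intro rs
  induction rs with
  | nil => rfl
  | cons p rest ih =>
    cases rest with
    | nil => rfl
    | cons q rest' =>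
      show (((p, q) :: (q :: rest').zip rest').map _) ++ _ = _
      rw [List.map_cons]
      have hz : (q :: rest').zip rest' = (q :: rest').zip (q :: rest').tail := rfl
      simp only [rtOf, List.isEmpty_cons, if_false, Bool.false_eq_true] at ih ⊢
      rw [List.cons_append, hz, ih]

-- expansion of typed runs into the per-character type list
def expandS (segs : List ((Int × Int) × Int)) : List Int :=
  segs.flatMap (fun p => List.replicate p.1.2.toNat p.2)

-- the LMS positions read off the typed runs
def lmsS : Option Int → Int → List ((Int × Int) × Int) → List Int
  | _, _, [] => []
  | prev, pos, p :: rest =>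
      (if prev == some 0 && p.2 == 1 then [pos] else []) ++ lmsS (some p.2) (pos + p.1.2) rest

-- Source B's fold in closed form
theorem foldB_closed : ∀ (segs : List ((Int × Int) × Int)) acc lms (pos : Int) prev,
    (segs.foldl stepBAlt (acc, lms, pos, prev)).1 = acc ++ expandS segs ∧
    (segs.foldl stepBAlt (acc, lms, pos, prev)).2.1 = lms ++ lmsS prev pos segs := by
  intro segs
  induction segs with
  | nil => intro acc lms pos prev; simp [expandS, lmsS]
  | cons p rest ih =>
    intro acc lms pos prev
    rw [List.foldl_cons]
    have hstep : stepBAlt (acc, lms, pos, prev) p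
        = (acc ++ List.replicate p.1.2.toNat p.2,
           (if prev == some 0 && p.2 == 1 then lms ++ [pos] else lms), pos + p.1.2, some p.2) := rfl
    rw [hstep]
    obtain ⟨h1, h2⟩ := ih (acc ++ List.replicate p.1.2.toNat p.2)
      (if prev == some 0 && p.2 == 1 then lms ++ [pos] else lms) (pos + p.1.2) (some p.2)
    constructor
    · rw [h1]; simp [expandS, List.flatMap_cons, List.append_assoc]
    · rw [h2, lmsS]
      by_cases hc : (prev == some 0 && p.2 == 1) = true
      · rw [if_pos hc, if_pos hc, List.append_assoc]
      · rw [if_neg hc, if_neg hc]; simp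

-- lmsP skips the interior of a run (previous type equals current type there)
theorem lmsP_replicate (t : Int) (l : List Int) : ∀ (k : Nat) (i : Int),
    lmsP t (List.replicate k t ++ l) i = lmsP t l (i + k) := by
  intro k
  induction k with
  | zero => intro i; simp
  | succ k ih =>
    intro i
    rw [List.replicate_succ, List.cons_append]
    show (if t == 0 && t == 1 then [i] else []) ++ lmsP t (List.replicate k t ++ l) (i + 1) = _
    have hf : (t == 0 && t == 1) = false := by
      by_cases h : t = 0 <;> simp [h]
    rw [hf, ih (i + 1)]
    have : i + 1 + (k : Int) = i + ((k + 1 : Nat) : Int) := by push_cast; ring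
    rw [this]; rfl

-- lmsP over the expansion is lmsS over the runs
theorem lmsP_expand : ∀ (segs : List ((Int × Int) × Int)),
    (∀ p ∈ segs, 1 ≤ p.1.2) → ∀ (p0 : Int) (i : Int),
    lmsP p0 (expandS segs) i = lmsS (some p0) i segs := by
  intro segs
  induction segs with
  | nil => intro _ p0 i; rfl
  | cons p rest ih =>
    intro hlen p0 i
    have hp : 1 ≤ p.1.2 := hlen p (by simp)
    have hk : ∃ k : Nat, p.1.2.toNat = k + 1 := ⟨p.1.2.toNat - 1, by omega⟩
    obtain ⟨k, hkk⟩ := hk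
    rw [expandS, List.flatMap_cons, hkk, List.replicate_succ, List.cons_append]
    show (if p0 == 0 && p.2 == 1 then [i] else [])
        ++ lmsP p.2 (List.replicate k p.2 ++ expandS rest) (i + 1) = _
    rw [lmsP_replicate, ih (fun q hq => hlen q (by simp [hq])) p.2 (i + 1 + k)]
    rw [lmsS]
    have hpos : i + 1 + (k : Int) = i + p.1.2 := by omega
    have hcond : (some p0 == some (0 : Int) && p.2 == 1) = (p0 == 0 && p.2 == 1) := by
      simp
    rw [hpos, hcond]

-- structure of runsOf: a run's prefix is constant
theorem takeWhile_eq_replicate (x : Int) : ∀ l : List Int,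
    l.takeWhile (fun c => c == x) = List.replicate (l.takeWhile (fun c => c == x)).length x := by
  intro l
  induction l with
  | nil => rfl
  | cons y r ih =>
    by_cases h : y = x
    · subst h
      rw [List.takeWhile_cons_of_pos (by simp)]
      simp only [List.length_cons, List.replicate_succ]
      exact congrArg _ ih
    · rw [List.takeWhile_cons_of_neg (by simp [h])]
      rfl

theorem runsOf_len_pos : ∀ (T : List Int), ∀ p ∈ runsOf T, 1 ≤ p.2 := by
  intro T
  induction T using runsOf.induct with
  | case1 => intro p hp; simp [runsOf] at hp
  | case2 x r ih =>
    intro p hp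
    rw [runsOf] at hp
    rcases List.mem_cons.mp hp with h | h
    · subst h
      have : (x :: r).takeWhile (fun c => c == x) = x :: r.takeWhile (fun c => c == x) :=
        List.takeWhile_cons_of_pos (by simp)
      simp [this]
    · exact ih p h

-- each character type is the type of its whole run
theorem typesOf_replicate (x : Int) : ∀ k, typesOf (List.replicate k x) = List.replicate k 1 := by
  intro k
  induction k with
  | zero => rfl
  | succ k ih =>
    cases k with
    | zero => rfl
    | succ j =>
      show typesOf (x :: x :: List.replicate j x) = _
      rw [typesOf, show (x :: List.replicate j x) = List.replicate (j + 1) x from rfl, ih]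
      have h1 : ¬ x > x := lt_irrefl x
      rw [if_neg h1, if_neg h1]
      cases j <;> simp [List.replicate_succ]

theorem typesOf_run (x w : Int) (l : List Int) (hne : x ≠ w) : ∀ k, 1 ≤ k →
    typesOf (List.replicate k x ++ w :: l)
      = List.replicate k (if x > w then 0 else 1) ++ typesOf (w :: l) := by
  intro k
  induction k with
  | zero => intro h; omega
  | succ k ih =>
    intro _
    cases k with
    | zero =>
      show typesOf (x :: w :: l) = _
      rw [typesOf]
      rcases lt_trichotomy x w with h | h | h
      · rw [if_neg (by omega), if_pos h, if_neg (by omega)]; rfl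
      · exact absurd h hne
      · rw [if_pos h, if_pos h]; rfl
    | succ j =>
      have ihj := ih (by omega)
      rw [List.replicate_succ, List.cons_append]
      have hcons : List.replicate (j + 1) x ++ w :: l
          = x :: (List.replicate j x ++ w :: l) := by rw [List.replicate_succ, List.cons_append]
      rw [hcons] at ihj ⊢
      show typesOf (x :: x :: (List.replicate j x ++ w :: l)) = _
      rw [typesOf, ihj]
      have h1 : ¬ x > x := lt_irrefl x
      rw [if_neg h1, if_neg h1]
      rw [List.replicate_succ, List.cons_append]
      congr 1

-- the head value of runsOf of a cons
theorem runsOf_cons (x : Int) (r : List Int) :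
    runsOf (x :: r) = (x, (((x :: r).takeWhile (fun c => c == x)).length : Int))
      :: runsOf ((x :: r).dropWhile (fun c => c == x)) := by
  rw [runsOf]

-- typesOf is the expansion of the typed runs
theorem typesOf_eq_expand : ∀ T : List Int,
    typesOf T = expandS ((runsOf T).zip (rtOf (runsOf T))) := by
  intro T
  induction T using runsOf.induct with
  | case1 =>
    rw [show runsOf ([] : List Int) = [] from by rw [runsOf]]
    rfl
  | case2 x r ih =>
    have htw : (x :: r).takeWhile (fun c => c == x) = x :: r.takeWhile (fun c => c == x) :=
      List.takeWhile_cons_of_pos (by simp)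
    have hsplit : (x :: r).takeWhile (fun c => c == x) ++ (x :: r).dropWhile (fun c => c == x)
        = x :: r := List.takeWhile_append_dropWhile
    set L := ((x :: r).takeWhile (fun c => c == x)).length with hL
    have hLpos : 1 ≤ L := by rw [hL, htw]; simp
    have hrepl : (x :: r).takeWhile (fun c => c == x) = List.replicate L x := by
      rw [hL]; exact takeWhile_eq_replicate x (x :: r)
    have hTeq : x :: r = List.replicate L x ++ (x :: r).dropWhile (fun c => c == x) := by
      rw [← hrepl]; exact hsplit.symm
    cases hrest : (x :: r).dropWhile (fun c => c == x) with
    | nil =>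
      rw [hrest] at hTeq ih
      rw [runsOf_cons, hrest, show runsOf ([] : List Int) = [] from by rw [runsOf], ← hL]
      show typesOf (x :: r) = expandS [((x, (L : Int)), 1)]
      rw [show typesOf (x :: r) = typesOf (List.replicate L x ++ []) from by rw [← hTeq],
         List.append_nil, typesOf_replicate]
      simp [expandS]
    | cons w r' =>
      have hw : w ≠ x := by
        have := List.head?_dropWhile_not (fun c => c == x) (x :: r)
        rw [hrest] at this
        simpa using this
      rw [hrest] at hTeq ih
      rw [runsOf_cons, hrest, ← hL]
      rw [runsOf_cons w r'] at ih ⊢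
      show typesOf (x :: r) = expandS (((x, (L : Int)) :: (w, _) :: _).zip (rtOf ((x, (L : Int)) :: (w, _) :: _)))
      rw [show rtOf ((x, (L : Int)) :: (w, (((w :: r').takeWhile (fun c => c == w)).length : Int))
            :: runsOf ((w :: r').dropWhile (fun c => c == w)))
          = (if x > w then 0 else 1)
            :: rtOf ((w, (((w :: r').takeWhile (fun c => c == w)).length : Int))
              :: runsOf ((w :: r').dropWhile (fun c => c == w))) from rfl]
      rw [List.zip_cons_cons, expandS, List.flatMap_cons]
      show typesOf (x :: r) = List.replicate (L : Int).toNat (if x > w then 0 else 1) ++ _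
      rw [show ((L : Int)).toNat = L from Int.toNat_natCast L]
      rw [show typesOf (x :: r) = typesOf (List.replicate L x ++ w :: r') from by rw [← hTeq]]
      rw [typesOf_run x w r' (fun h => hw h.symm) L hLpos, ih]
      rfl

-- ===== final equivalence =====
theorem ascB_eq_lmsS (x : Int) (r : List Int) :
    ascB (x :: r) 0 = lmsS none 0 ((runsOf (x :: r)).zip (rtOf (runsOf (x :: r)))) := by
  have hrun := runsOf_cons x r
  set rest := (x :: r).dropWhile (fun c => c == x) with hrest
  set L := ((x :: r).takeWhile (fun c => c == x)).length with hL
  have hLpos : 1 ≤ L := by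
    rw [hL, List.takeWhile_cons_of_pos (by simp)]; simp
  obtain ⟨k, hk⟩ : ∃ k, L = k + 1 := ⟨L - 1, by omega⟩
  obtain ⟨c, ct, hct⟩ : ∃ c ct, rtOf ((x, (L : Int)) :: runsOf rest) = c :: ct := by
    cases h : runsOf rest with
    | nil => exact ⟨1, [], rfl⟩
    | cons q t => exact ⟨_, _, rfl⟩
  have hseg : (runsOf (x :: r)).zip (rtOf (runsOf (x :: r)))
      = ((x, (L : Int)), c) :: (runsOf rest).zip ct := by
    rw [hrun, hct, List.zip_cons_cons]
  have hts : typesOf (x :: r) = List.replicate (k + 1) c ++ expandS ((runsOf rest).zip ct) := by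
    rw [typesOf_eq_expand, hseg, expandS, List.flatMap_cons]
    rw [show ((L : Int)).toNat = L from Int.toNat_natCast L, hk]
    rfl
  have hpos : 0 < (x :: r).length := by simp
  unfold ascB
  rw [filter_eq_lmsP (x :: r) ((x :: r).length) 0 hpos (by omega)]
  have hget0 : (typesOf (x :: r)).getD 0 1 = c := by
    rw [hts, List.replicate_succ, List.cons_append, List.getD_cons_zero]
  have hdrop1 : (typesOf (x :: r)).drop 1 = List.replicate k c ++ expandS ((runsOf rest).zip ct) := by
    rw [hts, List.replicate_succ, List.cons_append, List.drop_one, List.tail_cons]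
  rw [hget0, hdrop1]
  have hlens : ∀ p ∈ (runsOf rest).zip ct, 1 ≤ p.1.2 := by
    intro p hp
    exact runsOf_len_pos rest p.1 (List.of_mem_zip hp).1
  have hcast : (((0 : Nat) : Int) + 1) = (1 : Int) := by norm_num
  rw [hcast, lmsP_replicate, lmsP_expand ((runsOf rest).zip ct) hlens c (1 + (k : Int))]
  rw [hseg, lmsS]
  have hc1 : ((none : Option Int) == some 0 && c == 1) = false := rfl
  rw [hc1]
  have hc2 : (1 : Int) + (k : Int) = 0 + ((L : Int)) := by rw [hk]; push_cast; ring
  rw [hc2]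
  simp

theorem ports_eq (T : List Int) : classify_chartype T = classify_chartype_alt T := by
  have hB : classify_chartype_alt T
      = ([] ++ expandS ((runsOf T).zip (rtOf (runsOf T))),
         [] ++ lmsS none 0 ((runsOf T).zip (rtOf (runsOf T)))) := by
    simp only [classify_chartype_alt]
    rw [zipmap_eq_rtOf (runsOf T)]
    obtain ⟨h1, h2⟩ := foldB_closed ((runsOf T).zip (rtOf (runsOf T))) [] [] 0 none
    rw [h1, h2]
  rw [hB]
  simp only [List.nil_append]
  cases T with
  | nil =>
    rw [show runsOf ([] : List Int) = [] from by rw [runsOf]]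
    rfl
  | cons x r =>
    rw [A_eq (x :: r) (by simp), Prod.mk.injEq]
    exact ⟨typesOf_eq_expand (x :: r), ascB_eq_lmsS x r⟩

-- ===== VERDICT (by name: the statement is the Claim_ definition above) =====
theorem classify_chartype_spec : Claim_equal_classify_chartype := by
  intro T _
  unfold Spec_classify_chartype
  exact ports_eq T
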